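-- pv_equiv track=rewrite | github.com/CVxTz/sudoku_solver | ocr/ocr_decoder.py | bucket_l
-- ===== SOURCE A (Python) =====
-- def bucket_l(l, cutoff=10):
--     res = [[]]
--
--     for x in l:
--         if len(res[-1]) == 0 or abs(res[-1][-1] - x) < cutoff:
--             res[-1].append(x)
--         else:
--             res.append([x])
--
--     return res
-- ===== SOURCE B (Python) =====
-- def bucket_l(l, cutoff=10):
--     res = [[]]
--     for x in reversed(l):
--         if not res[0] or abs(x - res[0][0]) < cutoff:
--             res[0] = [x] + res[0]
--         else:
--             res = [[x]] + res
--     return res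
-- ===== Notes on version B (the rewrite author's own statement) =====
-- stated objective: alternative
-- what changed: B builds the buckets back-to-front: it scans the list in reverse, prepending each element to the first bucket when it is within cutoff of that bucket's head, instead of A's forward scan that grows the last bucket by comparing with its last element.
import Mathlib
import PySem

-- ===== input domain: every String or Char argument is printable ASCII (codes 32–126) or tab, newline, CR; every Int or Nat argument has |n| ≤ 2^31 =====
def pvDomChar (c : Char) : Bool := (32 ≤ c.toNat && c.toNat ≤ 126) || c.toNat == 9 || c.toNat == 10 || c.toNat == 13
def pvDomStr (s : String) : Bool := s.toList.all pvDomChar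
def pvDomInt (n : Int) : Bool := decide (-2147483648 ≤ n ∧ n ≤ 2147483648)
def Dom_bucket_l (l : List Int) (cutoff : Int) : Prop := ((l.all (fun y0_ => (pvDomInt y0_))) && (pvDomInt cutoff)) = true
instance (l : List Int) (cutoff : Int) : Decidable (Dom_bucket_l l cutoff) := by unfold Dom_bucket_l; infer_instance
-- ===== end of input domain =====

-- B builds the same buckets back-to-front (reversed scan, prepend to the first bucket) instead of A's forward scan growing the last bucket; equal return value proved for all inputs.

-- ===== PORT A =====
-- loop body of A: res[-1] is the last bucket (res is never empty); append to it or start a new one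
def bucketStep (cutoff : Int) (res : List (List Int)) (x : Int) : List (List Int) :=
  let last := res.getLastD []
  if last.length = 0 ∨ |last.getLastD 0 - x| < cutoff then
    res.dropLast ++ [last ++ [x]]
  else
    res ++ [[x]]

def bucket_l (l : List Int) (cutoff : Int) : List (List Int) :=
  l.foldl (bucketStep cutoff) [[]]

-- ===== PORT B =====
-- loop body of B: x is prepended to the first bucket or opens a new first bucket
-- (the [] case is unreachable: the accumulator starts at [[]] and never becomes empty)
def altStep (cutoff : Int) (x : Int) (res : List (List Int)) : List (List Int) :=
  match res with
  | [] => [[x]]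
  | g :: gs => if g.length = 0 ∨ |x - g.headD 0| < cutoff then (x :: g) :: gs else [x] :: g :: gs

def bucket_l_alt (l : List Int) (cutoff : Int) : List (List Int) :=
  l.foldr (altStep cutoff) [[]]

-- ===== PRECONDITION & SPEC =====
def Spec_bucket_l (l : List Int) (cutoff : Int) (out : List (List Int)) : Prop := out = bucket_l_alt l cutoff
instance (l : List Int) (cutoff : Int) (out : List (List Int)) : Decidable (Spec_bucket_l l cutoff out) := by unfold Spec_bucket_l; infer_instance

-- ===== CLAIM (what is proved, stated in full; the proofs are below) =====
def Claim_equal_bucket_l : Prop := ∀ (l : List Int) (cutoff : Int), Dom_bucket_l l cutoff → Spec_bucket_l l cutoff (bucket_l l cutoff)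

-- ===== LEMMAS AND PROOFS =====

/-- Apply `f` to the first element of a list, keep the rest. -/
def mapHead (f : List Int → List Int) : List (List Int) → List (List Int)
  | [] => []
  | g :: gs => f g :: gs

/-- On a nonempty input B's result is nonempty and its first bucket starts with the head. -/
lemma alt_head (c x : Int) (xs : List Int) :
    ∃ g gs, bucket_l_alt (x :: xs) c = (x :: g) :: gs := by
  simp only [bucket_l_alt, List.foldr_cons]
  cases h : (xs.foldr (altStep c) [[]]) with
  | nil => exact ⟨[], [], rfl⟩
  | cons g gs =>
    simp only [altStep]
    split
    · exact ⟨g, gs, rfl⟩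
    · exact ⟨[], g :: gs, rfl⟩

/-- Loop invariant: A's fold over `rest`, started in a state whose last bucket is
    `b' ++ [p]`, yields `acc` followed by B's grouping of `p :: rest` with `b'`
    glued onto the front of its first bucket. -/
lemma foldA_eq (c : Int) (rest : List Int) :
    ∀ (acc : List (List Int)) (b' : List Int) (p : Int),
      List.foldl (bucketStep c) (acc ++ [b' ++ [p]]) rest
        = acc ++ mapHead (fun g => b' ++ g) (bucket_l_alt (p :: rest) c) := by
  induction rest with
  | nil =>
    intro acc b' p
    simp [bucket_l_alt, altStep, mapHead]
  | cons y ys ih =>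
    intro acc b' p
    obtain ⟨g, gs, hg⟩ := alt_head c y ys
    have hstep : bucket_l_alt (p :: y :: ys) c = altStep c p (bucket_l_alt (y :: ys) c) := rfl
    by_cases h : |p - y| < c
    · have h1 : bucketStep c (acc ++ [b' ++ [p]]) y = acc ++ [(b' ++ [p]) ++ [y]] := by
        simp [bucketStep, h]
      have h2 := ih acc (b' ++ [p]) y
      rw [List.foldl_cons, h1, h2, hstep, hg]
      simp [altStep, h, mapHead]
    · have h1 : bucketStep c (acc ++ [b' ++ [p]]) y = (acc ++ [b' ++ [p]]) ++ [[] ++ [y]] := by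
        simp [bucketStep, h]
      have h2 := ih (acc ++ [b' ++ [p]]) [] y
      rw [List.foldl_cons, h1, h2, hstep, hg]
      simp [altStep, h, mapHead]

lemma bucket_eq_alt (l : List Int) (c : Int) : bucket_l l c = bucket_l_alt l c := by
  cases l with
  | nil => rfl
  | cons x xs =>
    have h0 : bucketStep c [[]] x = [] ++ [[] ++ [x]] := by simp [bucketStep]
    have := foldA_eq c xs [] [] x
    obtain ⟨g, gs, hg⟩ := alt_head c x xs
    simp only [bucket_l, List.foldl_cons, h0]
    rw [this, hg]
    simp [mapHead]

-- ===== VERDICT (by name: the statement is the Claim_ definition above) =====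
theorem bucket_l_spec : Claim_equal_bucket_l := by
  intro l cutoff _
  exact bucket_eq_alt l cutoff
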